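-- pv_equiv track=rewrite | github.com/XWasNotDeclared/TTTN_DeBai | HamVaLop/PhanTichChuoi/gen.py | solve
-- ===== SOURCE A (Python) =====
-- def solve(data):
--     """
--     Hàm giải bài toán chính.
--     - data: danh sách dữ liệu đã được đọc từ input (kiểu string).
--     - Trả về: list chứa các dòng kết quả (string).
--     """
--     t = int(data[0])
--     idx = 1
--     result = []
--     for _ in range(t):
--         s = data[idx]
--         idx += 1
--         num_chars = len(s)
--         num_words = len(s.strip().split()) if s.strip() else 0
--         num_upper = sum(1 for c in s if c.isupper())
--         result.append(f"{num_chars} {num_words} {num_upper}")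
--     return result
-- ===== SOURCE B (Python) =====
-- def solve(data):
--     t = int(data[0])
--     result = []
--     for i in range(t):
--         s = data[i + 1]
--         words = 0
--         upper = 0
--         in_word = False
--         for c in s:
--             if c.isspace():
--                 in_word = False
--             else:
--                 if not in_word:
--                     words += 1
--                     in_word = True
--                 if c.isupper():
--                     upper += 1
--         result.append(f"{len(s)} {words} {upper}")
--     return result
-- ===== Notes on version B (the rewrite author's own statement) =====
-- stated objective: alternative
-- what changed: Per string, B computes word and uppercase counts in one hand-rolled character scan with an in-word flag, replacing A's strip()+split() pass and separate isupper() sum; the outer loop reads data[i+1] directly instead of a mutable idx counter.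
import Mathlib
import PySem

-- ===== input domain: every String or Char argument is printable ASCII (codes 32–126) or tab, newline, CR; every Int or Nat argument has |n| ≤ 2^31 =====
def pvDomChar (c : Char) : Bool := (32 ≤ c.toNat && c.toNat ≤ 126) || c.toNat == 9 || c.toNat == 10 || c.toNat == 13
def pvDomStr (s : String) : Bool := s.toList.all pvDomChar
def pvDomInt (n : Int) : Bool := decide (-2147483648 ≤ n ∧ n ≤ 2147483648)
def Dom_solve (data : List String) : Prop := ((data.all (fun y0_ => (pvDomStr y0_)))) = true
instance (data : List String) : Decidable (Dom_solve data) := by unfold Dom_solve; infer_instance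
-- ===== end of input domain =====

-- B merges A's per-string strip()+split() word count and separate isupper() sum into a
-- single character scan with an in-word flag; return values proved equal on Pre_solve.

-- ===== PORT A =====
-- literal transliteration of Source A: idx counter threaded through the loop state
def solve (data : List String) : List String :=
  let t := (PySem.Int.ofStr? (PySem.List.pyGetD data 0 "")).getD 0
  let r := (PySem.List.pyRange 0 t 1).foldl
    (fun (st : Int × List String) _ =>
      let s := PySem.List.pyGetD data st.1 ""
      let num_chars : Int := PySem.Str.len s
      let num_words : Int :=
        if (PySem.Str.strip s).toList ≠ [] then ((PySem.Str.split₀ (PySem.Str.strip s)).length : Int) else 0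
      let num_upper : Int := (s.toList.map (fun c => if PySem.Chars.isupper c then (1:Int) else 0)).sum
      (st.1 + 1,
       st.2 ++ [PySem.Int.toStr num_chars ++ " " ++ PySem.Int.toStr num_words ++ " " ++ PySem.Int.toStr num_upper]))
    (1, [])
  r.2

-- ===== PORT B =====
-- literal transliteration of Source B: one scan per string, state (in_word, words, upper)
def solve_alt (data : List String) : List String :=
  let t := (PySem.Int.ofStr? (PySem.List.pyGetD data 0 "")).getD 0
  (PySem.List.pyRange 0 t 1).foldl
    (fun result i =>
      let s := PySem.List.pyGetD data (i + 1) ""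
      let st := s.toList.foldl
        (fun (p : Bool × Int × Int) c =>
          if PySem.Chars.isspace c then (false, p.2.1, p.2.2)
          else (true, (if p.1 then p.2.1 else p.2.1 + 1),
                p.2.2 + (if PySem.Chars.isupper c then (1:Int) else 0)))
        (false, 0, 0)
      result ++ [PySem.Int.toStr (PySem.Str.len s) ++ " " ++ PySem.Int.toStr st.2.1 ++ " " ++ PySem.Int.toStr st.2.2])
    []

-- ===== PRECONDITION & SPEC =====
-- Pre_solve: exactly where Python A returns: data nonempty, data[0] parses as an int t
-- (else IndexError/ValueError), and t < len(data) (else data[idx] raises IndexError).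
def Pre_solve (data : List String) : Prop :=
  data ≠ [] ∧ (PySem.Int.ofStr? (PySem.List.pyGetD data 0 "")).isSome = true ∧
    (PySem.Int.ofStr? (PySem.List.pyGetD data 0 "")).getD 0 < (data.length : Int)
instance (data : List String) : Decidable (Pre_solve data) := by unfold Pre_solve; infer_instance
def pvWitness_solve : List String := ["2", "Hello World", "  aB  "]

def Spec_solve (data : List String) (out : List String) : Prop := out = solve_alt data
instance (data : List String) (out : List String) : Decidable (Spec_solve data out) := by unfold Spec_solve; infer_instance

-- ===== CLAIM (what is proved, stated in full; the proofs are below) =====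
def Claim_equal_solve : Prop := ∀ (data : List String), Dom_solve data → Pre_solve data → Spec_solve data (solve data)

-- ===== LEMMAS AND PROOFS =====

-- word-start counter: pvW cs b = number of words in cs when the in-word flag starts as b
def pvW : List Char → Bool → Int
  | [], _ => 0
  | c :: rest, b =>
    if PySem.Chars.isspace c then pvW rest false
    else (if b then 0 else 1) + pvW rest true

lemma not_isupper_of_isspace {c : Char} (h : PySem.Chars.isspace c = true) :
    PySem.Chars.isupper c = false := by
  simp only [PySem.Chars.isspace, Char.toNat, decide_eq_true_eq, Bool.or_eq_true,
    Bool.and_eq_true] at h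
  simp only [PySem.Chars.isupper, Char.le_def, UInt32.le_iff_toNat_le, Bool.and_eq_false_iff,
    decide_eq_false_iff_not, not_le]
  have hA : 'A'.val.toNat = 65 := rfl
  have hZ : 'Z'.val.toNat = 90 := rfl
  omega

lemma pvW_all_space : ∀ (sp : List Char), (∀ c ∈ sp, PySem.Chars.isspace c = true) →
    ∀ b, pvW sp b = 0 := by
  intro sp
  induction sp with
  | nil => intro _ _; rfl
  | cons c rest ih =>
    intro h b
    simp [pvW, h c (by simp)]
    exact ih (fun x hx => h x (by simp [hx])) false

lemma pvW_append_space {sp : List Char} (h : ∀ c ∈ sp, PySem.Chars.isspace c = true) :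
    ∀ (l : List Char) (b : Bool), pvW (l ++ sp) b = pvW l b := by
  intro l
  induction l with
  | nil => intro b; simpa [pvW] using pvW_all_space sp h b
  | cons c rest ih =>
    intro b
    by_cases hc : PySem.Chars.isspace c = true
    · simp [pvW, hc, ih]
    · simp [pvW, hc, ih]

lemma pvW_lstrip (cs : List Char) :
    pvW (cs.dropWhile PySem.Chars.isspace) false = pvW cs false := by
  induction cs with
  | nil => rfl
  | cons c rest ih =>
    by_cases hc : PySem.Chars.isspace c = true
    · simpa [List.dropWhile, hc, pvW] using ih
    · simp [List.dropWhile, hc]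

lemma pvW_rstrip (l : List Char) (b : Bool) :
    pvW (PySem.Chars.rstrip l) b = pvW l b := by
  have hdecomp : l = PySem.Chars.rstrip l ++ (l.reverse.takeWhile PySem.Chars.isspace).reverse := by
    simp only [PySem.Chars.rstrip]
    rw [← List.reverse_append, List.takeWhile_append_dropWhile, List.reverse_reverse]
  conv_rhs => rw [hdecomp]
  rw [pvW_append_space]
  intro c hc
  simp only [List.mem_reverse] at hc
  exact List.mem_takeWhile_imp hc

lemma pvW_strip (cs : List Char) :
    pvW (PySem.Chars.strip cs) false = pvW cs false := by
  rw [PySem.Chars.strip, pvW_rstrip, PySem.Chars.lstrip, pvW_lstrip]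

-- split₀.go returns acc.length + (1 if a word is open) + pvW of the rest
lemma go_len : ∀ (cs cur : List Char) (acc : List (List Char)),
    ((PySem.Chars.split₀.go cs cur acc).length : Int)
      = acc.length + (if cur.isEmpty then 0 else 1) + pvW cs (!cur.isEmpty) := by
  intro cs
  induction cs with
  | nil =>
    intro cur acc
    by_cases h : cur.isEmpty <;> simp [PySem.Chars.split₀.go, h, pvW]
  | cons c rest ih =>
    intro cur acc
    by_cases hc : PySem.Chars.isspace c = true
    · by_cases h : cur.isEmpty <;> simp [PySem.Chars.split₀.go, hc, h, pvW, ih]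
    · by_cases h : cur.isEmpty
      · simp [PySem.Chars.split₀.go, hc, h, pvW, ih]; ring
      · simp [PySem.Chars.split₀.go, hc, h, pvW, ih]

lemma split₀_len (cs : List Char) :
    ((PySem.Chars.split₀ cs).length : Int) = pvW cs false := by
  simpa using go_len cs [] []

-- A's word count (strip + split with the truthiness branch) equals pvW of the raw string
lemma words_eq (s : String) :
    (if (PySem.Str.strip s).toList ≠ [] then ((PySem.Str.split₀ (PySem.Str.strip s)).length : Int) else 0)
      = pvW s.toList false := by
  by_cases h : (PySem.Str.strip s).toList = []
  · simp only [h, ne_eq, not_true_eq_false, if_false]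
    rw [← pvW_strip s.toList, ← PySem.Str.toList_strip, h]
    rfl
  · simp only [ne_eq, h, not_false_eq_true, if_true, PySem.Str.split₀, List.length_map]
    rw [split₀_len, PySem.Str.toList_strip, pvW_strip]

-- B's inner scan computes (·, w + pvW cs b, u + upper count)
lemma scan_spec (cs : List Char) : ∀ (b : Bool) (w u : Int),
    (cs.foldl
      (fun (p : Bool × Int × Int) c =>
        if PySem.Chars.isspace c then (false, p.2.1, p.2.2)
        else (true, (if p.1 then p.2.1 else p.2.1 + 1),
              p.2.2 + (if PySem.Chars.isupper c then (1:Int) else 0)))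
      (b, w, u)).2
    = (w + pvW cs b, u + (cs.map (fun c => if PySem.Chars.isupper c then (1:Int) else 0)).sum) := by
  induction cs with
  | nil => intro b w u; simp [pvW]
  | cons c rest ih =>
    intro b w u
    by_cases hc : PySem.Chars.isspace c = true
    · simp [List.foldl_cons, hc, ih, pvW, not_isupper_of_isspace hc]
    · by_cases hb : b <;> simp [List.foldl_cons, hc, hb, ih, pvW] <;> omega

-- the formatted output lines at index i: A's form and B's pvW form
def pvLineA (data : List String) (i : Int) : String :=
  let s := PySem.List.pyGetD data i ""
  PySem.Int.toStr (PySem.Str.len s) ++ " " ++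
    PySem.Int.toStr (if (PySem.Str.strip s).toList ≠ [] then
      ((PySem.Str.split₀ (PySem.Str.strip s)).length : Int) else 0) ++ " " ++
    PySem.Int.toStr ((s.toList.map (fun c => if PySem.Chars.isupper c then (1:Int) else 0)).sum)

def pvLine (data : List String) (i : Int) : String :=
  let s := PySem.List.pyGetD data i ""
  PySem.Int.toStr (PySem.Str.len s) ++ " " ++ PySem.Int.toStr (pvW s.toList false) ++ " " ++
    PySem.Int.toStr ((s.toList.map (fun c => if PySem.Chars.isupper c then (1:Int) else 0)).sum)

lemma lineA_eq_line (data : List String) (i : Int) : pvLineA data i = pvLine data i := by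
  simp only [pvLineA, pvLine, words_eq]

-- A's outer fold: the idx counter walks i0, i0+1, … and appends pvLineA at each index
set_option maxHeartbeats 1000000 in
lemma foldlA_spec (data : List String) : ∀ (l : List Int) (i0 : Int) (acc : List String),
    (l.foldl
      (fun (st : Int × List String) _ =>
        let s := PySem.List.pyGetD data st.1 ""
        let num_chars : Int := PySem.Str.len s
        let num_words : Int :=
          if (PySem.Str.strip s).toList ≠ [] then ((PySem.Str.split₀ (PySem.Str.strip s)).length : Int) else 0
        let num_upper : Int := (s.toList.map (fun c => if PySem.Chars.isupper c then (1:Int) else 0)).sum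
        (st.1 + 1,
         st.2 ++ [PySem.Int.toStr num_chars ++ " " ++ PySem.Int.toStr num_words ++ " " ++ PySem.Int.toStr num_upper]))
      (i0, acc)).2
    = acc ++ (List.range l.length).map (fun (k : Nat) => pvLineA data (i0 + (k : Int))) := by
  intro l
  induction l with
  | nil =>
    intro i0 acc
    simp only [List.foldl_nil, List.length_nil, List.range_zero, List.map_nil, List.append_nil]
  | cons x rest ih =>
    intro i0 acc
    simp only [List.foldl_cons]
    rw [ih]
    show (acc ++ [pvLineA data i0]) ++ _ = _
    rw [List.append_assoc]
    congr 1
    rw [List.length_cons, List.range_succ_eq_map, List.map_cons, List.map_map]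
    simp only [List.singleton_append, Nat.cast_zero, add_zero, Function.comp_def, Nat.cast_succ]
    apply List.cons_eq_cons.mpr
    refine ⟨rfl, ?_⟩
    apply List.map_congr_left
    intro a _
    congr 1
    ring

-- ===== VERDICT (by name: the statement is the Claim_ definition above) =====
theorem solve_spec : Claim_equal_solve := by
  intro data _ _
  show solve data = solve_alt data
  simp only [solve, solve_alt, PySem.List.pyRange_one]
  rw [foldlA_spec, List.foldl_map, PySem.List.foldl_append_singleton_eq_map]
  simp only [List.nil_append, List.length_map, List.length_range]
  apply List.map_congr_left
  intro y _
  have hi : (0:Int) + (y:Int) + 1 = 1 + (y:Int) := by ring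
  rw [hi, lineA_eq_line]
  have h := scan_spec (PySem.List.pyGetD data (1 + (y:Int)) "").toList false 0 0
  simp only [pvLine, h, zero_add]
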